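-- pv_equiv track=rewrite | github.com/tOrryV/Multi-bit-arithmetic | main.py | LongSubstration
-- ===== SOURCE A (Python) =====
-- def LongSubstration(a, b):
--     '''if LongCompare(a, b) == -1:
--         result = LongSubstration(b, a)
--         result.insert(0, 1)
--         return result
-- '''
--     borrow = 0
--     sub = []
--     max_len = max(len(a), len(b))
--     for i in range(max_len):
--         temp_A = int(a[i]) if i < len(a) else 0
--         temp_B = int(b[i]) if i < len(b) else 0
--         temp = temp_A - temp_B - borrow
--         if temp >= 0:
--             sub.append(temp)
--             borrow = 0
--         else:
--             sub.append((2 ** 32 + temp))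
--             borrow = 1
--     if borrow != 0:
--         return None
--     else:
--         while len(sub) > 1 and sub[-1] == 0:
--             sub.pop()
--         return sub
-- ===== SOURCE B (Python) =====
-- def LongSubstration(a, b):
--     BASE = 2 ** 32
--     def value(words):
--         total = 0
--         for w in reversed(words):
--             total = total * BASE + w
--         return total
--     d = value(a) - value(b)
--     if d < 0:
--         return None
--     digits = []
--     while d > 0:
--         digits.append(d % BASE)
--         d //= BASE
--     return digits if digits else [0]
-- ===== Notes on version B (the rewrite author's own statement) =====
-- stated objective: alternative
-- what changed: Replaces the word-wise borrow-propagation loop plus trailing-zero stripping by a value round-trip: convert both word lists to integers via Horner evaluation, subtract once, and rebuild the minimal little-endian base-2^32 digit list by repeated divmod.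
-- intended difference: On the single input a=[] and b=[], A returns [] while B returns [0]; [0] is the intended canonical representation of zero, the same value A itself returns for e.g. [5]-[5]. — e.g. on LongSubstration([], []): A returns some [], B returns some [0]
-- outside the precondition, e.g. on LongSubstration([2147483648], [-2147483648]): A returns [4294967296], B returns [0, 1]
import Mathlib
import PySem

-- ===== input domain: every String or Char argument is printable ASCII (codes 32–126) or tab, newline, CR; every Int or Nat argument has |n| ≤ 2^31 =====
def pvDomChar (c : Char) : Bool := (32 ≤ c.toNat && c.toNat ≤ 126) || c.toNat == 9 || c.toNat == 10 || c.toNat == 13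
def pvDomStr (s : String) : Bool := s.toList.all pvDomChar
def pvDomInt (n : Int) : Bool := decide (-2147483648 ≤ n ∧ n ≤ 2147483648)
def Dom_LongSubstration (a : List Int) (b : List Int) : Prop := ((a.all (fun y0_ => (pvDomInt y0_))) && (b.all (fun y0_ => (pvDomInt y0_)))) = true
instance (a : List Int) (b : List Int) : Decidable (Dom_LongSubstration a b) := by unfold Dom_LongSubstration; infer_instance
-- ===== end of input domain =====

-- B replaces A's word-wise borrow loop by an integer round-trip (Horner value, one subtraction,
-- rebuild digits by divmod); same return value on valid base-2^32 word lists (see Pre_),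
-- except the canonical zero for ([], []) (see D_).

-- ===== PORT A =====
-- one iteration of A's for-loop: state is (borrow, sub)
def pvStepA (a b : List Int) (st : Int × List Int) (i : Int) : Int × List Int :=
  let tempA : Int := if i < (a.length : Int) then (PySem.List.pyGet? a i).getD 0 else 0
  let tempB : Int := if i < (b.length : Int) then (PySem.List.pyGet? b i).getD 0 else 0
  let temp := tempA - tempB - st.1
  if temp ≥ 0 then (0, st.2 ++ [temp]) else (1, st.2 ++ [4294967296 + temp])

-- termination measure fact for pvStripA (named so the recursion closure stays small)
theorem pvStripA_dec (sub : List Int) (h : 1 < sub.length) :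
    sub.dropLast.length < sub.length := by
  rw [List.length_dropLast]; omega

-- A's trailing-zero while-loop: while len(sub) > 1 and sub[-1] == 0: sub.pop()
def pvStripA (sub : List Int) : List Int :=
  if 1 < sub.length ∧ PySem.List.pyGet? sub (-1) = some 0 then pvStripA sub.dropLast else sub
termination_by sub.length
decreasing_by
  rename_i h
  exact pvStripA_dec sub h.1

def LongSubstration (a : List Int) (b : List Int) : Option (List Int) :=
  let maxLen : Int := max (a.length : Int) (b.length : Int)
  let st := (PySem.List.pyRange 0 maxLen 1).foldl (pvStepA a b) (0, [])
  if st.1 ≠ 0 then none else some (pvStripA st.2)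

-- ===== PORT B =====
-- value(words): Horner evaluation over reversed(words)
def pvValue (words : List Int) : Int :=
  words.reverse.foldl (fun total w => total * 4294967296 + w) 0

-- termination measure fact for pvDigitsB (named so the recursion closure stays small)
theorem pvDigitsB_dec (d : Int) (h : 0 < d) :
    (PySem.Int.floordiv d 4294967296).toNat < d.toNat := by
  have h1 : PySem.Int.floordiv d 4294967296 = d / 4294967296 :=
    PySem.Int.floordiv_eq_ediv_of_pos (by norm_num)
  rw [h1]
  omega

-- the while d > 0 loop: append d % BASE, d //= BASE
def pvDigitsB (d : Int) : List Int :=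
  if 0 < d then PySem.Int.mod d 4294967296 :: pvDigitsB (PySem.Int.floordiv d 4294967296) else []
termination_by d.toNat
decreasing_by
  rename_i h
  exact pvDigitsB_dec d h

def LongSubstration_alt (a : List Int) (b : List Int) : Option (List Int) :=
  let d := pvValue a - pvValue b
  if d < 0 then none
  else
    let digits := pvDigitsB d
    some (if digits.isEmpty then [0] else digits)

-- ===== PRECONDITION & SPEC =====
-- Pre_ excludes inputs where some aligned word pair differs by exactly ±2^32 (possible only with
-- out-of-range words such as negative ones, outside the base-2^32 word domain the function is for);
-- there A's borrow loop emits an un-normalized word like 4294967296, an artefact of its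
-- implementation, while B returns the normalized representation of the same value.
def Pre_LongSubstration (a : List Int) (b : List Int) : Prop :=
  ∀ i < max a.length b.length,
    a.getD i 0 - b.getD i 0 ≠ 4294967296 ∧ a.getD i 0 - b.getD i 0 ≠ -4294967296
instance (a : List Int) (b : List Int) : Decidable (Pre_LongSubstration a b) := by
  unfold Pre_LongSubstration; infer_instance

def pvWitness_LongSubstration : List Int × List Int := ([7, 1], [3])

-- On the single input a = [] and b = [], A returns [] while B returns [0]; [0] is the intended
-- canonical representation of zero, the same value A itself returns for e.g. [5] - [5].
def D_LongSubstration (a : List Int) (b : List Int) : Prop := a = [] ∧ b = []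
instance (a : List Int) (b : List Int) : Decidable (D_LongSubstration a b) := by
  unfold D_LongSubstration; infer_instance

def Spec_LongSubstration (a : List Int) (b : List Int) (out : Option (List Int)) : Prop :=
  ¬ D_LongSubstration a b → out = LongSubstration_alt a b
instance (a : List Int) (b : List Int) (out : Option (List Int)) : Decidable (Spec_LongSubstration a b out) := by
  unfold Spec_LongSubstration; infer_instance

def pvDiffWitness_LongSubstration : List Int × List Int := ([], [])
def pvDiffWitnessOut_LongSubstration : (Option (List Int)) × (Option (List Int)) :=
  (some [], some [0])

-- ===== CLAIM (what is proved, stated in full; the proofs are below) =====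
def Claim_unchanged_LongSubstration : Prop := ∀ (a : List Int) (b : List Int), Dom_LongSubstration a b → Pre_LongSubstration a b → Spec_LongSubstration a b (LongSubstration a b)
def Claim_changed_LongSubstration : Prop := Dom_LongSubstration (pvDiffWitness_LongSubstration.1) (pvDiffWitness_LongSubstration.2) ∧ Pre_LongSubstration (pvDiffWitness_LongSubstration.1) (pvDiffWitness_LongSubstration.2) ∧ D_LongSubstration (pvDiffWitness_LongSubstration.1) (pvDiffWitness_LongSubstration.2) ∧ LongSubstration (pvDiffWitness_LongSubstration.1) (pvDiffWitness_LongSubstration.2) = pvDiffWitnessOut_LongSubstration.1 ∧ LongSubstration_alt (pvDiffWitness_LongSubstration.1) (pvDiffWitness_LongSubstration.2) = pvDiffWitnessOut_LongSubstration.2 ∧ pvDiffWitnessOut_LongSubstration.1 ≠ pvDiffWitnessOut_LongSubstration.2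
def Claim_exact_LongSubstration : Prop := ∀ (a : List Int) (b : List Int), Dom_LongSubstration a b → Pre_LongSubstration a b → D_LongSubstration a b → LongSubstration a b ≠ LongSubstration_alt a b

-- ===== LEMMAS AND PROOFS =====

-- proof-side structural version of A's subtraction loop
def pvSubW (a b : List Int) (br : Int) : Int × List Int :=
  if a = [] ∧ b = [] then (br, [])
  else
    let temp := a.headD 0 - b.headD 0 - br
    let r := pvSubW a.tail b.tail (if temp ≥ 0 then 0 else 1)
    (r.1, (if temp ≥ 0 then temp else 4294967296 + temp) :: r.2)
termination_by a.length + b.length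
decreasing_by
  rename_i h
  rcases a with _ | ⟨x, a⟩ <;> rcases b with _ | ⟨y, b⟩ <;> simp_all <;> omega

theorem pvSubW_nil : pvSubW [] [] br = (br, []) := by
  rw [pvSubW]; simp

theorem pvValue_nil : pvValue [] = 0 := rfl

theorem pvValue_cons (x : Int) (xs : List Int) :
    pvValue (x :: xs) = pvValue xs * 4294967296 + x := by
  simp [pvValue, List.foldl_append]

theorem pvValue_nonneg (xs : List Int) (h : ∀ y ∈ xs, 0 ≤ y) : 0 ≤ pvValue xs := by
  induction xs with
  | nil => simp [pvValue_nil]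
  | cons x t ih =>
    rw [pvValue_cons]
    have h1 := h x (by simp)
    have h2 : 0 ≤ pvValue t := ih (fun y hy => h y (by simp [hy]))
    nlinarith

theorem pvValue_lt (xs : List Int) (h : ∀ y ∈ xs, 0 ≤ y ∧ y < 4294967296) :
    pvValue xs < 4294967296 ^ xs.length := by
  induction xs with
  | nil => simp [pvValue_nil]
  | cons x t ih =>
    rw [pvValue_cons]
    have h1 := h x (by simp)
    have h2 : pvValue t < 4294967296 ^ t.length := ih (fun y hy => h y (by simp [hy]))
    have : pvValue t * 4294967296 ≤ (4294967296 ^ t.length - 1) * 4294967296 := by nlinarith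
    simp only [List.length_cons, pow_succ]
    nlinarith

theorem pvHeadD_eq_getD (a : List Int) : a.headD 0 = a.getD 0 0 := by
  cases a <;> simp

theorem pvTail_getD (a : List Int) (i : Nat) : a.tail.getD i 0 = a.getD (i+1) 0 := by
  cases a <;> simp

-- invariant of the subtraction loop: positionwise |a_i - b_i| < 2^32 keeps every digit in range
theorem pvSubW_spec (n : Nat) : ∀ (a b : List Int), a.length + b.length ≤ n →
    (∀ i : Nat, -4294967295 ≤ a.getD i 0 - b.getD i 0 ∧ a.getD i 0 - b.getD i 0 ≤ 4294967295) →
    ∀ br : Int, (br = 0 ∨ br = 1) →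
    ((pvSubW a b br).1 = 0 ∨ (pvSubW a b br).1 = 1) ∧
    (pvSubW a b br).2.length = max a.length b.length ∧
    (∀ y ∈ (pvSubW a b br).2, 0 ≤ y ∧ y < 4294967296) ∧
    pvValue (pvSubW a b br).2 =
      pvValue a - pvValue b - br + (pvSubW a b br).1 * 4294967296 ^ (max a.length b.length) := by
  induction n with
  | zero =>
    intro a b hlen _ br hbr
    have ha : a = [] := by cases a <;> simp_all
    have hb : b = [] := by cases b <;> simp_all
    subst ha hb
    rcases hbr with h | h <;> subst h <;> simp [pvSubW_nil, pvValue_nil]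
  | succ n ih =>
    intro a b hlen hd br hbr
    by_cases hnil : a = [] ∧ b = []
    · obtain ⟨ha, hb⟩ := hnil; subst ha hb
      rcases hbr with h | h <;> subst h <;> simp [pvSubW_nil, pvValue_nil]
    · rw [pvSubW]; simp only [if_neg hnil]
      set temp := a.headD 0 - b.headD 0 - br with htemp
      have hnz : ¬ (a.length = 0 ∧ b.length = 0) := by
        rintro ⟨h1, h2⟩
        exact hnil ⟨List.length_eq_zero_iff.mp h1, List.length_eq_zero_iff.mp h2⟩
      have hta : a.tail.length = a.length - 1 := List.length_tail
      have htb : b.tail.length = b.length - 1 := List.length_tail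
      have hlen' : a.tail.length + b.tail.length ≤ n := by omega
      have hd' : ∀ i : Nat, -4294967295 ≤ a.tail.getD i 0 - b.tail.getD i 0 ∧
          a.tail.getD i 0 - b.tail.getD i 0 ≤ 4294967295 := by
        intro i
        rw [pvTail_getD, pvTail_getD]
        exact hd (i+1)
      have hbr' : (if temp ≥ 0 then (0:Int) else 1) = 0 ∨ (if temp ≥ 0 then (0:Int) else 1) = 1 := by
        split <;> simp
      obtain ⟨ih1, ih2, ih3, ih4⟩ := ih a.tail b.tail hlen' hd' _ hbr'
      set r := pvSubW a.tail b.tail (if temp ≥ 0 then 0 else 1) with hr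
      have hhead : -4294967295 ≤ a.headD 0 - b.headD 0 ∧ a.headD 0 - b.headD 0 ≤ 4294967295 := by
        rw [pvHeadD_eq_getD, pvHeadD_eq_getD]
        exact hd 0
      have hmax : max a.length b.length = max a.tail.length b.tail.length + 1 := by omega
      have hvala : pvValue a = pvValue a.tail * 4294967296 + a.headD 0 := by
        rcases a with _ | ⟨x, a⟩
        · simp [pvValue_nil]
        · simp [pvValue_cons]
      have hvalb : pvValue b = pvValue b.tail * 4294967296 + b.headD 0 := by
        rcases b with _ | ⟨y, b⟩
        · simp [pvValue_nil]
        · simp [pvValue_cons]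
      refine ⟨ih1, ?_, ?_, ?_⟩
      · simp [ih2, hmax]
      · intro y hy
        simp only [List.mem_cons] at hy
        rcases hy with hy | hy
        · subst hy
          split <;> rcases hbr with h | h <;> rw [h] at htemp <;>
            constructor <;> omega
        · exact ih3 y hy
      · rw [hmax, pow_succ]
        split
        · rename_i hge
          rw [if_pos hge] at ih4
          rw [pvValue_cons, ih4, hvala, hvalb]; push_cast; ring
        · rename_i hlt
          rw [if_neg hlt] at ih4
          rw [pvValue_cons, ih4, hvala, hvalb]; push_cast; ring

-- bridge: A's indexed foldl over range(max_len) equals the structural loop pvSubW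
theorem pvBridge_aux (fuel : Nat) : ∀ (a b : List Int) (i br : Int) (acc : List Int),
    0 ≤ i → ((max (a.length : Int) (b.length : Int)) - i).toNat = fuel →
    (PySem.List.pyRange i (max (a.length : Int) (b.length : Int)) 1).foldl (pvStepA a b) (br, acc) =
      ((pvSubW (a.drop i.toNat) (b.drop i.toNat) br).1,
       acc ++ (pvSubW (a.drop i.toNat) (b.drop i.toNat) br).2) := by
  induction fuel with
  | zero =>
    intro a b i br acc hi hfuel
    have hge : max (a.length : Int) (b.length : Int) ≤ i := by omega
    rw [PySem.List.pyRange_one_eq_nil hge]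
    have hda : a.drop i.toNat = [] := by
      apply List.drop_eq_nil_of_le; omega
    have hdb : b.drop i.toNat = [] := by
      apply List.drop_eq_nil_of_le; omega
    simp [hda, hdb, pvSubW_nil]
  | succ fuel ih =>
    intro a b i br acc hi hfuel
    have hlt : i < max (a.length : Int) (b.length : Int) := by omega
    rw [PySem.List.pyRange_one_cons hlt]
    simp only [List.foldl_cons]
    have hnotnil : ¬ (a.drop i.toNat = [] ∧ b.drop i.toNat = []) := by
      rintro ⟨h1, h2⟩
      rw [List.drop_eq_nil_iff] at h1 h2
      omega
    have hheadA : (if i < (a.length : Int) then (PySem.List.pyGet? a i).getD 0 else 0)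
        = (a.drop i.toNat).headD 0 := by
      split
      · rename_i h
        rw [PySem.List.pyGet?_of_nonneg a hi]
        have hlt' : i.toNat < a.length := by omega
        simp [List.getElem?_eq_getElem hlt', List.headD_eq_head?, List.head?_drop,
          List.getElem?_eq_getElem hlt']
      · rename_i h
        have : a.drop i.toNat = [] := by apply List.drop_eq_nil_of_le; omega
        simp [this]
    have hheadB : (if i < (b.length : Int) then (PySem.List.pyGet? b i).getD 0 else 0)
        = (b.drop i.toNat).headD 0 := by
      split
      · rename_i h
        rw [PySem.List.pyGet?_of_nonneg b hi]
        have hlt' : i.toNat < b.length := by omega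
        simp [List.getElem?_eq_getElem hlt', List.headD_eq_head?, List.head?_drop,
          List.getElem?_eq_getElem hlt']
      · rename_i h
        have : b.drop i.toNat = [] := by apply List.drop_eq_nil_of_le; omega
        simp [this]
    have htails : (a.drop i.toNat).tail = a.drop (i+1).toNat ∧
                  (b.drop i.toNat).tail = b.drop (i+1).toNat := by
      constructor <;> · rw [List.tail_drop]; congr 1; omega
    rw [pvStepA]
    simp only [hheadA, hheadB]
    set temp := (a.drop i.toNat).headD 0 - (b.drop i.toNat).headD 0 - br with htemp
    conv_rhs => rw [pvSubW]
    simp only [if_neg hnotnil]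
    rw [← htemp, htails.1, htails.2]
    split
    · rename_i hge
      rw [ih a b (i+1) 0 (acc ++ [temp]) (by omega) (by omega)]
      simp
    · rename_i hltt
      rw [ih a b (i+1) 1 (acc ++ [4294967296 + temp]) (by omega) (by omega)]
      simp

theorem pvBridge (a b : List Int) :
    (PySem.List.pyRange 0 (max (a.length : Int) (b.length : Int)) 1).foldl (pvStepA a b) (0, ([] : List Int)) =
      pvSubW a b 0 := by
  have := pvBridge_aux ((max (a.length : Int) (b.length : Int)) - 0).toNat a b 0 0 [] le_rfl rfl
  simpa using this

-- pvStripA: value preserved, result nonempty, elements preserved, trailing shape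
theorem pvStripA_props (n : Nat) : ∀ (xs : List Int), xs.length ≤ n →
    pvValue (pvStripA xs) = pvValue xs ∧
    (xs ≠ [] → pvStripA xs ≠ []) ∧
    (∀ y ∈ pvStripA xs, y ∈ xs) ∧
    ((pvStripA xs).length ≤ 1 ∨ (pvStripA xs).getLast? ≠ some 0) := by
  induction n with
  | zero =>
    intro xs hlen
    have : xs = [] := by cases xs <;> simp_all
    subst this
    rw [pvStripA]; simp
  | succ n ih =>
    intro xs hlen
    rw [pvStripA]
    split
    · rename_i h
      obtain ⟨hl, hlast⟩ := h
      rw [PySem.List.pyGet?_neg_one] at hlast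
      have hxs : xs ≠ [] := by rintro rfl; simp at hl
      have hdec : xs.dropLast.length ≤ n := by
        simp [List.length_dropLast]; omega
      obtain ⟨iv, ine, imem, ilast⟩ := ih xs.dropLast hdec
      refine ⟨?_, ?_, ?_, ilast⟩
      · rw [iv]
        have hx : xs = xs.dropLast ++ [0] := by
          conv_lhs => rw [← List.dropLast_append_getLast hxs]
          congr 1
          have := List.getLast?_eq_some_getLast hxs
          rw [this] at hlast
          simpa using hlast
        conv_rhs => rw [hx]
        simp [pvValue, List.foldl_append]
      · intro _
        apply ine
        intro hc
        have : xs.dropLast.length = 0 := by rw [hc]; rfl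
        rw [List.length_dropLast] at this
        omega
      · intro y hy
        exact List.dropLast_subset _ (imem y hy)
    · rename_i h
      push_neg at h
      refine ⟨rfl, fun hne => hne, fun y hy => hy, ?_⟩
      by_cases h1 : 1 < xs.length
      · right
        have := h h1
        rw [PySem.List.pyGet?_neg_one] at this
        exact this
      · left; omega

-- value 0 with nonnegative digits means all digits are 0
theorem pvValue_zero_all (xs : List Int) (h : ∀ y ∈ xs, 0 ≤ y ∧ y < 4294967296)
    (hv : pvValue xs = 0) : ∀ y ∈ xs, y = 0 := by
  induction xs with
  | nil => simp
  | cons x t ih =>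
    rw [pvValue_cons] at hv
    have hx := h x (by simp)
    have ht : 0 ≤ pvValue t := pvValue_nonneg t (fun y hy => (h y (by simp [hy])).1)
    have hx0 : x = 0 ∧ pvValue t = 0 := by constructor <;> nlinarith
    intro y hy
    simp only [List.mem_cons] at hy
    rcases hy with rfl | hy
    · exact hx0.1
    · exact ih (fun y hy => h y (by simp [hy])) hx0.2 y hy

-- a canonical nonempty digit list has positive value
theorem pvValue_pos (xs : List Int) (h : ∀ y ∈ xs, 0 ≤ y ∧ y < 4294967296)
    (hne : xs ≠ []) (hlast : xs.getLast? ≠ some 0) : 0 < pvValue xs := by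
  rcases lt_or_eq_of_le (pvValue_nonneg xs (fun y hy => (h y hy).1)) with hgt | heq
  · exact hgt
  · exfalso
    have hall := pvValue_zero_all xs h heq.symm
    apply hlast
    rw [List.getLast?_eq_some_getLast hne]
    exact congrArg some (hall _ (List.getLast_mem hne))

-- uniqueness of the canonical representation
theorem pvUnique (xs : List Int) : ∀ (ys : List Int),
    (∀ y ∈ xs, 0 ≤ y ∧ y < 4294967296) → (∀ y ∈ ys, 0 ≤ y ∧ y < 4294967296) →
    xs.getLast? ≠ some 0 → ys.getLast? ≠ some 0 →
    pvValue xs = pvValue ys → xs = ys := by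
  induction xs with
  | nil =>
    intro ys _ hdy _ hly hv
    rw [pvValue_nil] at hv
    by_contra hne
    have := pvValue_pos ys hdy (fun h => hne (h ▸ rfl)) hly
    omega
  | cons x t ih =>
    intro ys hdx hdy hlx hly hv
    rcases ys with _ | ⟨y, u⟩
    · exfalso
      rw [pvValue_nil] at hv
      have := pvValue_pos (x :: t) hdx (by simp) hlx
      omega
    · rw [pvValue_cons, pvValue_cons] at hv
      have hx := hdx x (by simp)
      have hy := hdy y (by simp)
      have hvt : 0 ≤ pvValue t := pvValue_nonneg t (fun z hz => (hdx z (by simp [hz])).1)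
      have hvu : 0 ≤ pvValue u := pvValue_nonneg u (fun z hz => (hdy z (by simp [hz])).1)
      have hxy : x = y ∧ pvValue t = pvValue u := by
        have h1 : (pvValue t - pvValue u) * 4294967296 = y - x := by linarith
        have hk : pvValue t = pvValue u := by
          by_contra hne
          rcases lt_or_gt_of_ne hne with hlt' | hgt'
          · have := mul_le_mul_of_nonneg_right
              (show pvValue t - pvValue u ≤ -1 by omega) (show (0:ℤ) ≤ 4294967296 by norm_num)
            linarith
          · have := mul_le_mul_of_nonneg_right
              (show (1:ℤ) ≤ pvValue t - pvValue u by omega) (show (0:ℤ) ≤ 4294967296 by norm_num)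
            linarith
        constructor
        · rw [hk] at h1; linarith
        · exact hk
      have hlt : t.getLast? ≠ some 0 := by
        rcases t with _ | ⟨z, t⟩
        · simp
        · intro hc
          apply hlx
          rw [List.getLast?_cons_cons]
          exact hc
      have hlu : u.getLast? ≠ some 0 := by
        rcases u with _ | ⟨z, u⟩
        · simp
        · intro hc
          apply hly
          rw [List.getLast?_cons_cons]
          exact hc
      have := ih u (fun z hz => hdx z (by simp [hz])) (fun z hz => hdy z (by simp [hz]))
        hlt hlu hxy.2
      rw [hxy.1, this]

-- pvDigitsB produces the canonical representation
theorem pvDigitsB_props (n : Nat) : ∀ d : Int, d.toNat ≤ n → 0 ≤ d →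
    pvValue (pvDigitsB d) = d ∧
    (∀ y ∈ pvDigitsB d, 0 ≤ y ∧ y < 4294967296) ∧
    (pvDigitsB d).getLast? ≠ some 0 ∧
    (pvDigitsB d = [] ↔ d = 0) := by
  induction n with
  | zero =>
    intro d hn hd
    have : d = 0 := by omega
    subst this
    rw [pvDigitsB]; simp [pvValue_nil]
  | succ n ih =>
    intro d hn hd
    rw [pvDigitsB]
    split
    · rename_i hpos
      have hdiv : PySem.Int.floordiv d 4294967296 = d / 4294967296 :=
        PySem.Int.floordiv_eq_ediv_of_pos (by norm_num)
      have hmod : PySem.Int.mod d 4294967296 = d % 4294967296 :=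
        PySem.Int.mod_eq_emod_of_pos (by norm_num)
      have hd' : 0 ≤ d / 4294967296 := by positivity
      have hn' : (d / 4294967296).toNat ≤ n := by omega
      obtain ⟨iv, idig, ilast, inil⟩ := ih (d / 4294967296) (by rw [← hdiv]; rw [hdiv]; exact hn') hd'
      rw [hdiv, hmod]
      have hmb : 0 ≤ d % 4294967296 ∧ d % 4294967296 < 4294967296 := by
        constructor
        · exact Int.emod_nonneg d (by norm_num)
        · exact Int.emod_lt_of_pos d (by norm_num)
      refine ⟨?_, ?_, ?_, ?_⟩
      · rw [pvValue_cons, iv]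
        omega
      · intro y hy
        simp only [List.mem_cons] at hy
        rcases hy with rfl | hy
        · exact hmb
        · exact idig y hy
      · rcases hrec : pvDigitsB (d / 4294967296) with _ | ⟨z, u⟩
        · have hq0 : d / 4294967296 = 0 := (inil.mp hrec)
          simp only [List.getLast?_singleton]
          intro hc
          have : d % 4294967296 = 0 := by injection hc
          omega
        · intro hc
          rw [List.getLast?_cons_cons] at hc
          rw [hrec] at ilast
          exact ilast hc
      · simp; omega
    · rename_i hnpos
      have : d = 0 := by omega
      subst this
      simp [pvValue_nil]

-- main equivalence on Pre_ outside D_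
theorem pvMain (a b : List Int) (hdom : Dom_LongSubstration a b)
    (hpre : Pre_LongSubstration a b) (hD : ¬ D_LongSubstration a b) :
    LongSubstration a b = LongSubstration_alt a b := by
  unfold Dom_LongSubstration at hdom
  simp only [Bool.and_eq_true, List.all_eq_true, pvDomInt, decide_eq_true_eq] at hdom
  unfold D_LongSubstration at hD
  unfold Pre_LongSubstration at hpre
  have hne : a ≠ [] ∨ b ≠ [] := by
    by_contra hc
    push_neg at hc
    exact hD ⟨hc.1, hc.2⟩
  have hda : ∀ i : Nat, i < a.length → -2147483648 ≤ a.getD i 0 ∧ a.getD i 0 ≤ 2147483648 := by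
    intro i hi
    rw [List.getD_eq_getElem a 0 hi]
    exact hdom.1 _ (List.getElem_mem hi)
  have hdb : ∀ i : Nat, i < b.length → -2147483648 ≤ b.getD i 0 ∧ b.getD i 0 ≤ 2147483648 := by
    intro i hi
    rw [List.getD_eq_getElem b 0 hi]
    exact hdom.2 _ (List.getElem_mem hi)
  have hd : ∀ i : Nat, -4294967295 ≤ a.getD i 0 - b.getD i 0 ∧
      a.getD i 0 - b.getD i 0 ≤ 4294967295 := by
    intro i
    have hxa : -2147483648 ≤ a.getD i 0 ∧ a.getD i 0 ≤ 2147483648 := by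
      by_cases hi : i < a.length
      · exact hda i hi
      · rw [List.getD_eq_default a 0 (by omega)]; norm_num
    have hxb : -2147483648 ≤ b.getD i 0 ∧ b.getD i 0 ≤ 2147483648 := by
      by_cases hi : i < b.length
      · exact hdb i hi
      · rw [List.getD_eq_default b 0 (by omega)]; norm_num
    by_cases hi : i < max a.length b.length
    · have hcl := hpre i hi
      constructor <;> omega
    · have h1 : a.getD i 0 = 0 := List.getD_eq_default a 0 (by omega)
      have h2 : b.getD i 0 = 0 := List.getD_eq_default b 0 (by omega)
      rw [h1, h2]; norm_num
  have hport : LongSubstration a b =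
      if (pvSubW a b 0).1 ≠ 0 then none else some (pvStripA (pvSubW a b 0).2) := by
    unfold LongSubstration
    rw [← pvBridge a b]
  have hport' : LongSubstration_alt a b =
      if pvValue a - pvValue b < 0 then none
      else some (if (pvDigitsB (pvValue a - pvValue b)).isEmpty then [0]
                 else pvDigitsB (pvValue a - pvValue b)) := rfl
  rw [hport, hport']
  obtain ⟨h1, h2, h3, h4⟩ := pvSubW_spec (a.length + b.length) a b le_rfl hd 0 (Or.inl rfl)
  set r := pvSubW a b 0 with hrdef
  set n := max a.length b.length with hn
  have hnpos : 0 < n := by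
    rcases hne with h | h <;> rcases a with _ | _ <;> rcases b with _ | _ <;> simp_all <;> omega
  have hvlt : pvValue r.2 < 4294967296 ^ n := by
    have := pvValue_lt r.2 h3
    rwa [h2] at this
  have hvge : 0 ≤ pvValue r.2 := pvValue_nonneg r.2 (fun y hy => (h3 y hy).1)
  set d := pvValue a - pvValue b with hd
  rcases h1 with hb0 | hb1
  · rw [hb0] at h4
    simp only [zero_mul, add_zero, sub_zero] at h4
    have hdval : pvValue r.2 = d := h4
    have hdge : 0 ≤ d := by omega
    simp only [hb0, ne_eq, not_true_eq_false, if_neg, not_false_eq_true]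
    rw [if_neg (by omega)]
    have hrne : r.2 ≠ [] := by
      intro hc
      have := h2
      rw [hc] at this
      simp at this
      omega
    obtain ⟨sv, sne, smem, slast⟩ := pvStripA_props r.2.length r.2 le_rfl
    have sdig : ∀ y ∈ pvStripA r.2, 0 ≤ y ∧ y < 4294967296 := fun y hy => h3 y (smem y hy)
    obtain ⟨dv, ddig, dlast, dnil⟩ := pvDigitsB_props d.toNat d le_rfl hdge
    by_cases hz : d = 0
    · rw [dnil.mpr hz]
      simp only [List.isEmpty_nil, if_pos]
      congr 1
      have hsv0 : pvValue (pvStripA r.2) = 0 := by rw [sv, hdval, hz]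
      have hall : ∀ y ∈ pvStripA r.2, y = 0 := pvValue_zero_all _ sdig hsv0
      have hsne := sne hrne
      rcases hs : pvStripA r.2 with _ | ⟨x, u⟩
      · exact absurd hs hsne
      · rcases u with _ | ⟨y, u⟩
        · rw [hs] at hall
          have := hall x (by simp)
          rw [this]
        · exfalso
          rw [hs] at slast hall
          rcases slast with hl | hl
          · simp at hl
          · apply hl
            rw [List.getLast?_eq_some_getLast (by simp)]
            exact congrArg some (hall _ (List.getLast_mem (by simp)))
    · have hdpos : 0 < d := by omega
      have hbne : pvDigitsB d ≠ [] := fun hc => hz (dnil.mp hc)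
      rw [if_neg (by simpa [List.isEmpty_iff] using hbne)]
      congr 1
      apply pvUnique _ _ sdig ddig _ dlast (by rw [sv, hdval, dv])
      rcases slast with hl | hl
      · rcases hs : pvStripA r.2 with _ | ⟨x, u⟩
        · exact absurd hs (sne hrne)
        · rcases u with _ | ⟨y, u⟩
          · have hx : x = d := by
              have := sv
              rw [hs, pvValue_cons, pvValue_nil, hdval] at this
              omega
            simp only [List.getLast?_singleton]
            intro hc
            have : x = 0 := by injection hc
            omega
          · rw [hs] at hl; simp at hl
      · exact hl
  · rw [hb1] at h4
    have hdneg : d < 0 := by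
      have : pvValue r.2 = d + 4294967296 ^ n := by rw [h4]; ring
      omega
    rw [hb1]
    simp only [ne_eq, one_ne_zero, not_false_eq_true, if_pos]
    rw [if_pos (by omega)]

theorem pvStripA_nil : pvStripA [] = [] := by
  rw [pvStripA]; simp

theorem pvDigitsB_zero : pvDigitsB 0 = [] := by
  rw [pvDigitsB]; simp

theorem pvA_nilnil : LongSubstration [] [] = some [] := by
  have hport : LongSubstration [] [] =
      if (pvSubW [] [] 0).1 ≠ 0 then none else some (pvStripA (pvSubW ([]:List Int) [] 0).2) := by
    unfold LongSubstration
    rw [← pvBridge [] []]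
  rw [hport, pvSubW_nil]
  simp [pvStripA_nil]

theorem pvB_nilnil : LongSubstration_alt [] [] = some [0] := by
  have h : LongSubstration_alt [] [] =
      if pvValue ([]:List Int) - pvValue ([]:List Int) < 0 then none
      else some (if (pvDigitsB (pvValue ([]:List Int) - pvValue ([]:List Int))).isEmpty then [0]
                 else pvDigitsB (pvValue ([]:List Int) - pvValue ([]:List Int))) := rfl
  rw [h]
  simp [pvValue_nil, pvDigitsB_zero]

-- ===== VERDICT (by name: the statements are the Claim_ definitions above) =====
theorem LongSubstration_spec : Claim_unchanged_LongSubstration := by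
  intro a b hdom hpre hD
  exact pvMain a b hdom hpre hD

theorem LongSubstration_changed : Claim_changed_LongSubstration := by
  unfold Claim_changed_LongSubstration
  refine ⟨by decide, ?_, by decide, ?_, ?_, by decide⟩
  · intro i hi
    simp [pvDiffWitness_LongSubstration] at hi
  · exact pvA_nilnil
  · exact pvB_nilnil

theorem LongSubstration_tight : Claim_exact_LongSubstration := by
  intro a b _ _ hD
  obtain ⟨ha, hb⟩ := hD
  subst ha hb
  rw [pvA_nilnil, pvB_nilnil]
  decide
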